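-- pv_equiv track=rewrite | github.com/alirezajavadi/tempname | replay_attack/de_storedM1.py | chebyshev_polynomial
-- ===== SOURCE A (Python) =====
-- def chebyshev_polynomial(n, x, p=14797):
--     if n == 0:
--         return 1
--     elif n == 1:
--         return x
--     else:
--         T_0 = 1
--         T_1 = x
--
--         for i in range(2, n + 1):
--             T_n = (2 * x * T_1 - T_0) % p
--             T_0 = T_1
--             T_1 = T_n
--
--         return T_1
--
-- x = 45567
--
-- p=14797
--
-- n = 98760
-- ===== SOURCE B (Python) =====
-- def chebyshev_polynomial(n, x, p=14797):
--     if n == 0: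
--         return 1
--     if n < 2:
--         return x
--     # (T_n, T_{n-1}) = M^(n-1) . (x, 1) with M = [[2x, -1], [1, 0]], entries kept mod p
--     a, b, c, d = 1, 0, 0, 1                      # accumulator = identity
--     ma, mb, mc, md = (2 * x) % p, (-1) % p, 1 % p, 0
--     e = n - 1
--     while e > 0:
--         if e & 1:
--             a, b, c, d = (a * ma + b * mc) % p, (a * mb + b * md) % p, \
--                          (c * ma + d * mc) % p, (c * mb + d * md) % p
--         ma, mb, mc, md = (ma * ma + mb * mc) % p, (ma * mb + mb * md) % p, \
--                          (mc * ma + md * mc) % p, (mc * mb + md * md) % p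
--         e >>= 1
--     return (a * x + b) % p
-- ===== Notes on version B (the rewrite author's own statement) =====
-- stated objective: faster
-- what changed: Replaces the O(n) linear recurrence loop by binary exponentiation of the 2x2 companion matrix [[2x,-1],[1,0]] mod p, applying the power to the vector (x,1).
import Mathlib
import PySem

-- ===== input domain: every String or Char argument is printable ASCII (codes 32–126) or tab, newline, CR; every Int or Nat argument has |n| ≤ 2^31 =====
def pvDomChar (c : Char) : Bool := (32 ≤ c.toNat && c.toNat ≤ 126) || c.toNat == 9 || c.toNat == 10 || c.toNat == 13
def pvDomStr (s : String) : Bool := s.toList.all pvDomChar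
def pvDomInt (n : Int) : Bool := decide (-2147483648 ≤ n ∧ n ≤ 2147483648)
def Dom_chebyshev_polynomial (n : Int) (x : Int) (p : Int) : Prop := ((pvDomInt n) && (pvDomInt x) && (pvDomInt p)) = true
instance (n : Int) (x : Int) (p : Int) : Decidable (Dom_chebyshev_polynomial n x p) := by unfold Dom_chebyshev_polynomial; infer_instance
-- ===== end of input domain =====

-- B replaces A's O(n) recurrence loop by O(log n) binary exponentiation of the companion matrix mod p.


-- ===== PORT A =====
-- literal port of A: loop 'for i in range(2, n+1)' carrying (T_0, T_1), each step (T_1, (2*x*T_1 - T_0) % p)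
def chebyshev_polynomial (n : Int) (x : Int) (p : Int) : Int :=
  if n = 0 then 1
  else if n = 1 then x
  else
    ((PySem.List.pyRange 2 (n + 1) 1).foldl
      (fun (s : Int × Int) _ => (s.2, PySem.Int.mod (2 * x * s.2 - s.1) p)) (1, x)).2

-- ===== PORT B =====
-- 2x2 matrix product with every entry reduced mod p (Source B's tuple update)
def pvMulMod (p : Int) (A B : Int × Int × Int × Int) : Int × Int × Int × Int :=
  (PySem.Int.mod (A.1 * B.1 + A.2.1 * B.2.2.1) p,
   PySem.Int.mod (A.1 * B.2.1 + A.2.1 * B.2.2.2) p,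
   PySem.Int.mod (A.2.2.1 * B.1 + A.2.2.2 * B.2.2.1) p,
   PySem.Int.mod (A.2.2.1 * B.2.1 + A.2.2.2 * B.2.2.2) p)

-- Source B's while-loop: multiply acc by m on a set bit, square m, halve e
def pvFastPow (p : Int) (m acc : Int × Int × Int × Int) (e : Nat) : Int × Int × Int × Int :=
  if e = 0 then acc
  else pvFastPow p (pvMulMod p m m) (if e % 2 = 1 then pvMulMod p acc m else acc) (e / 2)
  termination_by e
  decreasing_by exact Nat.div_lt_self (Nat.pos_of_ne_zero (by assumption)) (by omega)

def chebyshev_polynomial_alt (n : Int) (x : Int) (p : Int) : Int :=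
  if n = 0 then 1
  else if n < 2 then x
  else
    let m0 : Int × Int × Int × Int :=
      (PySem.Int.mod (2 * x) p, PySem.Int.mod (-1) p, PySem.Int.mod 1 p, 0)
    let r := pvFastPow p m0 (1, 0, 0, 1) (n - 1).toNat
    PySem.Int.mod (r.1 * x + r.2.1) p

-- ===== PRECONDITION & SPEC =====
-- Pre_ excludes exactly n ≥ 2 with p = 0, where A raises ZeroDivisionError ('% p' in the loop)
def Pre_chebyshev_polynomial (n : Int) (x : Int) (p : Int) : Prop := n < 2 ∨ p ≠ 0
instance (n : Int) (x : Int) (p : Int) : Decidable (Pre_chebyshev_polynomial n x p) := by unfold Pre_chebyshev_polynomial; infer_instance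
def pvWitness_chebyshev_polynomial : Int × Int × Int := (5, 3, 7)

def Spec_chebyshev_polynomial (n : Int) (x : Int) (p : Int) (out : Int) : Prop := out = chebyshev_polynomial_alt n x p
instance (n : Int) (x : Int) (p : Int) (out : Int) : Decidable (Spec_chebyshev_polynomial n x p out) := by unfold Spec_chebyshev_polynomial; infer_instance

-- ===== CLAIM (what is proved, stated in full; the proofs are below) =====
def Claim_equal_chebyshev_polynomial : Prop := ∀ (n : Int) (x : Int) (p : Int), Dom_chebyshev_polynomial n x p → Pre_chebyshev_polynomial n x p → Spec_chebyshev_polynomial n x p (chebyshev_polynomial n x p)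

-- ===== LEMMAS AND PROOFS =====

-- pure (un-modded) Chebyshev recurrence
def pvT (x : Int) : Nat → Int
  | 0 => 1
  | 1 => x
  | (k + 2) => 2 * x * pvT x (k + 1) - pvT x k

-- pure 2x2 matrix product and power
def pvMul (A B : Int × Int × Int × Int) : Int × Int × Int × Int :=
  (A.1 * B.1 + A.2.1 * B.2.2.1, A.1 * B.2.1 + A.2.1 * B.2.2.2,
   A.2.2.1 * B.1 + A.2.2.2 * B.2.2.1, A.2.2.1 * B.2.1 + A.2.2.2 * B.2.2.2)

def pvPow (m : Int × Int × Int × Int) : Nat → Int × Int × Int × Int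
  | 0 => (1, 0, 0, 1)
  | k + 1 => pvMul (pvPow m k) m

lemma pvPow_zero (m : Int × Int × Int × Int) : pvPow m 0 = (1, 0, 0, 1) := rfl
lemma pvPow_succ (m : Int × Int × Int × Int) (k : Nat) : pvPow m (k + 1) = pvMul (pvPow m k) m := rfl
lemma pvT_two_add (x : Int) (k : Nat) : pvT x (k + 2) = 2 * x * pvT x (k + 1) - pvT x k := rfl

-- entrywise congruence mod p
def pvCong (p : Int) (A B : Int × Int × Int × Int) : Prop :=
  A.1 ≡ B.1 [ZMOD p] ∧ A.2.1 ≡ B.2.1 [ZMOD p] ∧ A.2.2.1 ≡ B.2.2.1 [ZMOD p] ∧ A.2.2.2 ≡ B.2.2.2 [ZMOD p]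

lemma pv_mod_modEq (a p : Int) : PySem.Int.mod a p ≡ a [ZMOD p] := by
  rw [Int.modEq_iff_dvd]
  have h := PySem.Int.floordiv_mul_add_mod a p
  exact ⟨PySem.Int.floordiv a p, by linarith [h]⟩

lemma pv_mod_congr {a b p : Int} (hp : p ≠ 0) (h : a ≡ b [ZMOD p]) :
    PySem.Int.mod a p = PySem.Int.mod b p := by
  have hd : p ∣ PySem.Int.mod b p - PySem.Int.mod a p := by
    rw [← Int.modEq_iff_dvd]
    exact ((pv_mod_modEq a p).trans h).trans (pv_mod_modEq b p).symm
  have : PySem.Int.mod b p - PySem.Int.mod a p = 0 := by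
    apply Int.eq_zero_of_dvd_of_natAbs_lt_natAbs hd
    rcases lt_or_gt_of_ne hp with hneg | hpos
    · have h1 := PySem.Int.mod_neg_bounds a hneg
      have h2 := PySem.Int.mod_neg_bounds b hneg
      omega
    · have h1 := PySem.Int.mod_nonneg a hpos
      have h2 := PySem.Int.mod_lt a hpos
      have h3 := PySem.Int.mod_nonneg b hpos
      have h4 := PySem.Int.mod_lt b hpos
      omega
  omega

lemma pvMulMod_cong {p : Int} {A B A' B' : Int × Int × Int × Int}
    (hA : pvCong p A A') (hB : pvCong p B B') : pvCong p (pvMulMod p A B) (pvMul A' B') := by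
  obtain ⟨ha1, ha2, ha3, ha4⟩ := hA
  obtain ⟨hb1, hb2, hb3, hb4⟩ := hB
  exact ⟨(pv_mod_modEq _ _).trans ((ha1.mul hb1).add (ha2.mul hb3)),
         (pv_mod_modEq _ _).trans ((ha1.mul hb2).add (ha2.mul hb4)),
         (pv_mod_modEq _ _).trans ((ha3.mul hb1).add (ha4.mul hb3)),
         (pv_mod_modEq _ _).trans ((ha3.mul hb2).add (ha4.mul hb4))⟩

lemma pvMul_assoc (A B C : Int × Int × Int × Int) : pvMul (pvMul A B) C = pvMul A (pvMul B C) := by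
  simp only [pvMul]
  refine Prod.ext ?_ (Prod.ext ?_ (Prod.ext ?_ ?_)) <;> ring

lemma pvMul_one (A : Int × Int × Int × Int) : pvMul A (1, 0, 0, 1) = A := by
  simp [pvMul]

lemma pvOne_mul (A : Int × Int × Int × Int) : pvMul (1, 0, 0, 1) A = A := by
  simp [pvMul]

lemma pvPow_succ_left (m : Int × Int × Int × Int) (k : Nat) :
    pvPow m (k + 1) = pvMul m (pvPow m k) := by
  induction k with
  | zero => rw [pvPow_succ, pvPow_zero, pvMul_one, pvOne_mul]
  | succ k ih => rw [pvPow_succ, ih, pvMul_assoc, ← pvPow_succ, ih]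

lemma pvPow_add (m : Int × Int × Int × Int) (a b : Nat) :
    pvPow m (a + b) = pvMul (pvPow m a) (pvPow m b) := by
  induction b with
  | zero => rw [pvPow_zero, pvMul_one]; rfl
  | succ b ih => rw [← Nat.add_assoc, pvPow_succ, ih, pvPow_succ, pvMul_assoc]

lemma pvPow_sq (m : Int × Int × Int × Int) (k : Nat) :
    pvPow (pvMul m m) k = pvPow m (2 * k) := by
  induction k with
  | zero => rfl
  | succ k ih =>
    rw [pvPow_succ, ih, show 2 * (k + 1) = 2 * k + 1 + 1 by ring,
      pvPow_succ, pvPow_succ, pvMul_assoc]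

lemma pvFastPow_cong (p : Int) :
    ∀ (e : Nat) (m acc m' acc' : Int × Int × Int × Int),
      pvCong p m m' → pvCong p acc acc' →
      pvCong p (pvFastPow p m acc e) (pvMul acc' (pvPow m' e)) := by
  intro e
  induction e using Nat.strong_induction_on with
  | _ e ih =>
    intro m acc m' acc' hm hacc
    by_cases he : e = 0
    · subst he
      rw [pvFastPow]
      simpa [pvPow, pvMul_one] using hacc
    · rw [pvFastPow, if_neg he]
      have hrec := ih (e / 2) (Nat.div_lt_self (Nat.pos_of_ne_zero he) (by omega))
        (pvMulMod p m m) (if e % 2 = 1 then pvMulMod p acc m else acc)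
        (pvMul m' m') (if e % 2 = 1 then pvMul acc' m' else acc')
        (pvMulMod_cong hm hm)
        (by by_cases h2 : e % 2 = 1
            · rw [if_pos h2, if_pos h2]; exact pvMulMod_cong hacc hm
            · rw [if_neg h2, if_neg h2]; exact hacc)
      have hpure : pvMul (if e % 2 = 1 then pvMul acc' m' else acc') (pvPow (pvMul m' m') (e / 2))
          = pvMul acc' (pvPow m' e) := by
        rw [pvPow_sq]
        by_cases h2 : e % 2 = 1
        · rw [if_pos h2, pvMul_assoc]
          have he' : e = 1 + 2 * (e / 2) := by omega
          conv_rhs => rw [he', pvPow_add, show (1:Nat) = 0 + 1 from rfl, pvPow_succ, pvPow_zero, pvOne_mul]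
        · rw [if_neg h2]
          have he' : e = 2 * (e / 2) := by omega
          rw [← he']
      rw [← hpure]
      exact hrec

-- pure matrix powers applied to (x, 1) realise the recurrence
lemma pvPow_apply (x : Int) : ∀ k : Nat,
    (pvPow (2 * x, -1, 1, 0) k).1 * x + (pvPow (2 * x, -1, 1, 0) k).2.1 = pvT x (k + 1) ∧
    (pvPow (2 * x, -1, 1, 0) k).2.2.1 * x + (pvPow (2 * x, -1, 1, 0) k).2.2.2 = pvT x k := by
  intro k
  induction k with
  | zero => simp [pvPow_zero, pvT]
  | succ k ih =>
    obtain ⟨h1, h2⟩ := ih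
    rw [pvPow_succ_left]
    constructor
    · show (2 * x * (pvPow (2 * x, -1, 1, 0) k).1 + -1 * (pvPow (2 * x, -1, 1, 0) k).2.2.1) * x +
        (2 * x * (pvPow (2 * x, -1, 1, 0) k).2.1 + -1 * (pvPow (2 * x, -1, 1, 0) k).2.2.2) = pvT x (k + 2)
      rw [pvT_two_add]
      linear_combination 2 * x * h1 - h2
    · show (1 * (pvPow (2 * x, -1, 1, 0) k).1 + 0 * (pvPow (2 * x, -1, 1, 0) k).2.2.1) * x +
        (1 * (pvPow (2 * x, -1, 1, 0) k).2.1 + 0 * (pvPow (2 * x, -1, 1, 0) k).2.2.2) = pvT x (k + 1)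
      linear_combination h1

-- A's loop step and its iteration
def pvStep (x p : Int) (s : Int × Int) : Int × Int := (s.2, PySem.Int.mod (2 * x * s.2 - s.1) p)

lemma pv_foldl_const (x p : Int) : ∀ (l : List Int) (s : Int × Int),
    l.foldl (fun (s : Int × Int) _ => (s.2, PySem.Int.mod (2 * x * s.2 - s.1) p)) s
      = (pvStep x p)^[l.length] s := by
  intro l
  induction l with
  | nil => intro s; rfl
  | cons a l ih =>
    intro s
    rw [List.foldl_cons, List.length_cons, Function.iterate_succ_apply, ih]
    rfl

lemma pv_pyRange_len : ∀ (k : Nat) (a : Int),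
    (PySem.List.pyRange a (a + k) 1).length = k := by
  intro k
  induction k with
  | zero =>
    intro a
    have h0 : a + ((0 : Nat) : Int) = a := by push_cast; ring
    rw [h0]
    have : PySem.List.pyRange a a 1 = [] := by
      simp [PySem.List.pyRange]
    rw [this]; rfl
  | succ k ih =>
    intro a
    rw [PySem.List.pyRange_one_cons (by omega), List.length_cons]
    have : a + (k + 1 : Nat) = (a + 1) + k := by push_cast; ring
    rw [this, ih]

-- invariant of A's iteration: components congruent to consecutive pvT values,
-- and after at least one step the second component is exactly pvT reduced mod p
lemma pv_iter_cong (x p : Int) : ∀ j : Nat,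
    ((pvStep x p)^[j] (1, x)).1 ≡ pvT x j [ZMOD p] ∧
    ((pvStep x p)^[j] (1, x)).2 ≡ pvT x (j + 1) [ZMOD p] := by
  intro j
  induction j with
  | zero => exact ⟨Int.ModEq.refl _, Int.ModEq.refl _⟩
  | succ j ih =>
    obtain ⟨h1, h2⟩ := ih
    rw [Function.iterate_succ_apply']
    refine ⟨h2, ?_⟩
    show PySem.Int.mod (2 * x * _ - _) p ≡ pvT x (j + 2) [ZMOD p]
    rw [pvT_two_add]
    exact (pv_mod_modEq _ _).trans (((Int.ModEq.refl (2 * x)).mul h2).sub h1)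

lemma pv_iter_exact {x p : Int} (hp : p ≠ 0) (j : Nat) :
    ((pvStep x p)^[j + 1] (1, x)).2 = PySem.Int.mod (pvT x (j + 2)) p := by
  obtain ⟨h1, h2⟩ := pv_iter_cong x p j
  rw [Function.iterate_succ_apply']
  show PySem.Int.mod (2 * x * _ - _) p = _
  exact pv_mod_congr hp (by rw [pvT_two_add]; exact ((Int.ModEq.refl (2 * x)).mul h2).sub h1)

-- ===== VERDICT (by name: the statement is the Claim_ definition above) =====
theorem chebyshev_polynomial_spec : Claim_equal_chebyshev_polynomial := by
  intro n x p _ hpre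
  unfold Spec_chebyshev_polynomial chebyshev_polynomial chebyshev_polynomial_alt
  by_cases h0 : n = 0
  · simp [h0]
  · rw [if_neg h0, if_neg h0]
    by_cases h1 : n = 1
    · simp [h1]
    · rw [if_neg h1]
      by_cases hlt : n < 2
      · -- n ≤ -1: A's range is empty, both return x
        rw [if_pos hlt]
        have : PySem.List.pyRange 2 (n + 1) 1 = [] := by
          simp [PySem.List.pyRange]; omega
        rw [this]; rfl
      · -- n ≥ 2
        rw [if_neg hlt]
        have hn2 : 2 ≤ n := by omega
        have hp : p ≠ 0 := hpre.resolve_left (by omega)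
        -- A's side
        set e : Nat := (n - 1).toNat with he
        have he1 : 1 ≤ e := by omega
        have hrange : (PySem.List.pyRange 2 (n + 1) 1).length = e := by
          have : n + 1 = 2 + ((e - 1 : Nat) + 1 : Nat) := by push_cast; omega
          rw [this, pv_pyRange_len]
          omega
        rw [pv_foldl_const, hrange]
        obtain ⟨j, hj⟩ : ∃ j : Nat, e = j + 1 := ⟨e - 1, by omega⟩
        have hA : ((pvStep x p)^[e] (1, x)).2 = PySem.Int.mod (pvT x (e + 1)) p := by
          rw [hj, show j + 1 + 1 = j + 2 from rfl]
          exact pv_iter_exact hp j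
        rw [hA]
        -- B's side
        have hm0 : pvCong p (PySem.Int.mod (2 * x) p, PySem.Int.mod (-1) p, PySem.Int.mod 1 p, (0 : Int))
            (2 * x, -1, 1, 0) :=
          ⟨pv_mod_modEq _ _, pv_mod_modEq _ _, pv_mod_modEq _ _, Int.ModEq.refl _⟩
        have hI : pvCong p ((1, 0, 0, 1) : Int × Int × Int × Int) (1, 0, 0, 1) :=
          ⟨Int.ModEq.refl _, Int.ModEq.refl _, Int.ModEq.refl _, Int.ModEq.refl _⟩
        have hfp := pvFastPow_cong p e _ _ _ _ hm0 hI
        rw [pvOne_mul] at hfp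
        obtain ⟨hc1, hc2, _, _⟩ := hfp
        obtain ⟨happ, _⟩ := pvPow_apply x e
        have hBcong : (pvFastPow p (PySem.Int.mod (2 * x) p, PySem.Int.mod (-1) p, PySem.Int.mod 1 p, 0)
              (1, 0, 0, 1) e).1 * x +
            (pvFastPow p (PySem.Int.mod (2 * x) p, PySem.Int.mod (-1) p, PySem.Int.mod 1 p, 0)
              (1, 0, 0, 1) e).2.1 ≡ pvT x (e + 1) [ZMOD p] := by
          calc _ ≡ (pvPow (2 * x, -1, 1, 0) e).1 * x + (pvPow (2 * x, -1, 1, 0) e).2.1 [ZMOD p] :=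
                (hc1.mul (Int.ModEq.refl x)).add hc2
            _ = pvT x (e + 1) := happ
        exact (pv_mod_congr hp hBcong).symm
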